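-- pv_equiv track=rewrite | github.com/Naveeth97/GFG-Solved-Problems | Difficulty: Easy/Kth distance/kth-distance.py | checkDuplicatesWithinK
-- ===== SOURCE A (Python) =====
-- def checkDuplicatesWithinK(arr, k):
--     # your code
--
--     # brute force solution
--
--     for i in range(len(arr)):
--
--         j = i + 1
--
--         while j < len(arr) and j <= i + k:
--
--             if arr[i] == arr[j]:
--                 return True
--
--             j += 1
--
--     return False
-- ===== SOURCE B (Python) =====
-- def checkDuplicatesWithinK(arr, k):
--     # Sliding-window set of the last k elements: O(n) instead of O(n*k).
--     if k <= 0: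
--         return False
--     window = set()
--     for i, x in enumerate(arr):
--         if x in window:
--             return True
--         window.add(x)
--         if i >= k:
--             window.discard(arr[i - k])
--     return False
-- ===== Notes on version B (the rewrite author's own statement) =====
-- stated objective: faster
-- what changed: Replaced the nested brute-force scan (for each i, compare arr[i] with the next k elements) by a single pass that maintains a sliding-window set of the last k elements and tests membership.
import Mathlib
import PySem

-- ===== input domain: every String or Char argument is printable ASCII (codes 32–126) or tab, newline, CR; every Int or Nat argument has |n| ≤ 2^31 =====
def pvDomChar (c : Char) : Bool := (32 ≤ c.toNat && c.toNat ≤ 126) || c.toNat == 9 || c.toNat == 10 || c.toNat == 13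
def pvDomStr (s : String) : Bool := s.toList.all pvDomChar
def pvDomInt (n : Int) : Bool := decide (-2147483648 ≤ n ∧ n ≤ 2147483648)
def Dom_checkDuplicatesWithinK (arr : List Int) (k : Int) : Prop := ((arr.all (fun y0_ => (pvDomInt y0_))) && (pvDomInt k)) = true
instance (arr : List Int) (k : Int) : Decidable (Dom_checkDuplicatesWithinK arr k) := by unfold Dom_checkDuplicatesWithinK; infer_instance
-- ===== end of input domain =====

-- B replaces A's nested O(n*k) scan by a one-pass sliding-window set (O(n)); same return value.

-- ===== PORT A =====
-- inner 'while j < len(arr) and j <= i + k' loop of A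
def pvAInner (arr : List Int) (k : Int) (i j : Nat) : Bool :=
  if h : j < arr.length ∧ (j : Int) ≤ (i : Int) + k then
    if PySem.List.pyGet? arr (i : Int) = PySem.List.pyGet? arr (j : Int) then true
    else pvAInner arr k i (j + 1)
  else false
termination_by arr.length - j
decreasing_by omega

-- outer 'for i in range(len(arr))' loop of A (with early return)
def pvAOuter (arr : List Int) (k : Int) (i : Nat) : Bool :=
  if h : i < arr.length then
    if pvAInner arr k i (i + 1) then true else pvAOuter arr k (i + 1)
  else false
termination_by arr.length - i

def checkDuplicatesWithinK (arr : List Int) (k : Int) : Bool :=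
  pvAOuter arr k 0

-- ===== PORT B =====
-- 'for i, x in enumerate(arr)' loop of B, carrying the sliding-window set
def pvBLoop (arr : List Int) (k : Int) (w : PySem.Set Int) : List (Int × Int) → Bool
  | [] => false
  | (i, x) :: rest =>
    if PySem.Set.contains w x then true
    else
      pvBLoop arr k
        (if k ≤ i then
          -- arr[i - k]; the index is always in range here, the none branch is unreachable
          match PySem.List.pyGet? arr (i - k) with
          | some y => PySem.Set.discard (PySem.Set.add w x) y
          | none => PySem.Set.add w x
        else PySem.Set.add w x) rest

def checkDuplicatesWithinK_alt (arr : List Int) (k : Int) : Bool :=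
  if k ≤ 0 then false
  else pvBLoop arr k PySem.Set.empty (PySem.List.enumerate arr 0)

-- ===== PRECONDITION & SPEC =====
def Spec_checkDuplicatesWithinK (arr : List Int) (k : Int) (out : Bool) : Prop := out = checkDuplicatesWithinK_alt arr k
instance (arr : List Int) (k : Int) (out : Bool) : Decidable (Spec_checkDuplicatesWithinK arr k out) := by unfold Spec_checkDuplicatesWithinK; infer_instance

-- ===== CLAIM (what is proved, stated in full; the proofs are below) =====
def Claim_equal_checkDuplicatesWithinK : Prop := ∀ (arr : List Int) (k : Int), Dom_checkDuplicatesWithinK arr k → Spec_checkDuplicatesWithinK arr k (checkDuplicatesWithinK arr k)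

-- ===== LEMMAS AND PROOFS =====

-- the common characterisation: a close duplicate pair with second index ≥ i
def pvHasPair (arr : List Int) (k : Int) (i : Nat) : Prop :=
  ∃ t j : Nat, t < j ∧ j < arr.length ∧ i ≤ j ∧ (j : Int) ≤ (t : Int) + k ∧
    arr.getD t 0 = arr.getD j 0

theorem pvAInner_iff (arr : List Int) (k : Int) (i : Nat) (hi : i < arr.length) :
    ∀ m j, arr.length - j ≤ m →
      (pvAInner arr k i j = true ↔
        ∃ j' : Nat, j ≤ j' ∧ j' < arr.length ∧ (j' : Int) ≤ (i : Int) + k ∧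
          arr.getD i 0 = arr.getD j' 0) := by
  intro m
  induction m with
  | zero =>
    intro j hj
    rw [pvAInner]
    have hjl : ¬ (j < arr.length ∧ (j : Int) ≤ (i : Int) + k) := by
      intro ⟨h1, _⟩; omega
    simp only [hjl, dif_neg, not_false_iff]
    constructor
    · intro h; exact absurd h (by simp)
    · rintro ⟨j', hjj', hj'l, _, _⟩; omega
  | succ m ih =>
    intro j hj
    rw [pvAInner]
    by_cases h : j < arr.length ∧ (j : Int) ≤ (i : Int) + k
    · rw [dif_pos h]
      have hgi : PySem.List.pyGet? arr (i : Int) = some (arr.getD i 0) := by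
        simp [PySem.List.pyGet?_natCast, List.getElem?_eq_getElem hi]
      have hgj : PySem.List.pyGet? arr (j : Int) = some (arr.getD j 0) := by
        simp [PySem.List.pyGet?_natCast, List.getElem?_eq_getElem h.1]
      rw [hgi, hgj]
      by_cases heq : arr.getD i 0 = arr.getD j 0
      · rw [if_pos (by rw [heq])]
        constructor
        · intro _; exact ⟨j, le_refl j, h.1, h.2, heq⟩
        · intro _; rfl
      · have hne : ¬ (some (arr.getD i 0) = some (arr.getD j 0)) :=
          fun hc => heq (Option.some.inj hc)
        rw [if_neg hne, ih (j + 1) (by omega)]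
        constructor
        · rintro ⟨j', h1, h2, h3, h4⟩; exact ⟨j', by omega, h2, h3, h4⟩
        · rintro ⟨j', h1, h2, h3, h4⟩
          refine ⟨j', ?_, h2, h3, h4⟩
          rcases Nat.eq_or_lt_of_le h1 with rfl | hlt
          · exact absurd h4 heq
          · omega
    · simp only [h, dif_neg, not_false_iff]
      constructor
      · intro hh; exact absurd hh (by simp)
      · rintro ⟨j', h1, h2, h3, _⟩
        exfalso
        apply h
        constructor
        · omega
        · have : (j : Int) ≤ (j' : Int) := by exact_mod_cast h1
          omega

theorem pvAOuter_iff (arr : List Int) (k : Int) :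
    ∀ m i, arr.length - i ≤ m →
      (pvAOuter arr k i = true ↔
        ∃ t j : Nat, i ≤ t ∧ t < j ∧ j < arr.length ∧ (j : Int) ≤ (t : Int) + k ∧
          arr.getD t 0 = arr.getD j 0) := by
  intro m
  induction m with
  | zero =>
    intro i hi
    rw [pvAOuter]
    have hil : ¬ i < arr.length := by omega
    rw [dif_neg hil]
    constructor
    · intro hh; exact absurd hh (by simp)
    · rintro ⟨t, j, h1, h2, h3, _, _⟩; omega
  | succ m ih =>
    intro i hi
    rw [pvAOuter]
    by_cases hil : i < arr.length
    · rw [dif_pos hil]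
      rcases hin : pvAInner arr k i (i + 1) with _ | _
      · rw [if_neg (by simp), ih (i + 1) (by omega)]
        constructor
        · rintro ⟨t, j, h1, h2, h3, h4, h5⟩; exact ⟨t, j, by omega, h2, h3, h4, h5⟩
        · rintro ⟨t, j, h1, h2, h3, h4, h5⟩
          refine ⟨t, j, ?_, h2, h3, h4, h5⟩
          rcases Nat.eq_or_lt_of_le h1 with heq | hlt
          · exfalso
            subst heq
            have : pvAInner arr k i (i + 1) = true :=
              (pvAInner_iff arr k i hil (arr.length - (i + 1)) (i + 1) (le_refl _)).2
                ⟨j, by omega, h3, h4, h5⟩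
            rw [hin] at this; exact absurd this (by simp)
          · omega
      · rw [if_pos rfl]
        constructor
        · intro _
          rcases (pvAInner_iff arr k i hil (arr.length - (i + 1)) (i + 1) (le_refl _)).1 hin
            with ⟨j', h1, h2, h3, h4⟩
          exact ⟨i, j', le_refl i, by omega, h2, h3, h4⟩
        · intro _; rfl
    · rw [dif_neg hil]
      constructor
      · intro hh; exact absurd hh (by simp)
      · rintro ⟨t, j, h1, h2, h3, _, _⟩; omega

theorem pvBLoop_iff (arr : List Int) (k : Int) (hk : 0 < k) :
    ∀ m (i : Nat) (w : PySem.Set Int), arr.length - i ≤ m → i ≤ arr.length →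
      (∀ v, v ∈ w ↔ ∃ t : Nat, i ≤ t + k.toNat ∧ t < i ∧ arr.getD t 0 = v) →
      (∀ t1 t2 : Nat, t1 < t2 → t2 < i → (t2 : Int) ≤ (t1 : Int) + k →
        arr.getD t1 0 ≠ arr.getD t2 0) →
      (pvBLoop arr k w (PySem.List.enumerate (arr.drop i) i) = true ↔ pvHasPair arr k i) := by
  have hk' : ((k.toNat : Int)) = k := Int.toNat_of_nonneg hk.le
  intro m
  induction m with
  | zero =>
    intro i w hm hil Hw Hnd
    have : i = arr.length := by omega
    subst this
    rw [List.drop_length, PySem.List.enumerate_nil, pvBLoop]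
    constructor
    · intro hh; exact absurd hh (by simp)
    · rintro ⟨t, j, _, h2, _, _, _⟩; omega
  | succ m ih =>
    intro i w hm hil Hw Hnd
    by_cases hlt : i < arr.length
    · rw [List.drop_eq_getElem_cons hlt, PySem.List.enumerate_cons, pvBLoop]
      have hx : arr[i] = arr.getD i 0 := (List.getD_eq_getElem arr 0 hlt).symm
      by_cases hc : arr.getD i 0 ∈ w
      · rw [hx, if_pos ((PySem.Set.contains_iff _ _).2 hc)]
        rcases (Hw _).1 hc with ⟨t, ht1, ht2, ht3⟩
        constructor
        · intro _
          exact ⟨t, i, ht2, hlt, le_refl i, by omega, ht3⟩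
        · intro _; rfl
      · rw [hx, if_neg (by rw [PySem.Set.contains_iff _ _]; exact hc)]
        have hcast : ((i : Int)) + 1 = (((i + 1 : Nat)) : Int) := by push_cast; ring
        rw [hcast]
        have hmem1 : ∀ v, v ∈ PySem.Set.add w (arr.getD i 0) ↔ v ∈ w ∨ v = arr.getD i 0 := by
          intro v; rw [PySem.Set.mem_add]
        have hstep : ∀ (w2 : PySem.Set Int),
            (∀ v, v ∈ w2 ↔ ∃ t : Nat, i + 1 ≤ t + k.toNat ∧ t < i + 1 ∧ arr.getD t 0 = v) →
            (pvBLoop arr k w2 (PySem.List.enumerate (arr.drop (i + 1)) ((i + 1 : Nat) : Int)) = true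
              ↔ pvHasPair arr k i) := by
          intro w2 Hw2
          rw [ih (i + 1) w2 (by omega) (by omega) Hw2 ?nd]
          case nd =>
            intro t1 t2 h1 h2 h3
            by_cases h4 : t2 < i
            · exact Hnd t1 t2 h1 h4 h3
            · have : t2 = i := by omega
              subst this
              intro heq
              exact hc ((Hw _).2 ⟨t1, by omega, h1, heq⟩)
          constructor
          · rintro ⟨t, j, h1, h2, h3, h4, h5⟩; exact ⟨t, j, h1, h2, by omega, h4, h5⟩
          · rintro ⟨t, j, h1, h2, h3, h4, h5⟩
            by_cases hj : i + 1 ≤ j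
            · exact ⟨t, j, h1, h2, hj, h4, h5⟩
            · exfalso
              have : j = i := by omega
              subst this
              exact hc ((Hw _).2 ⟨t, by omega, h1, h5⟩)
        by_cases hki : k ≤ (i : Int)
        · rw [if_pos hki]
          have hkn : k.toNat ≤ i := by omega
          have hidx : ((i : Int)) - k = (((i - k.toNat : Nat)) : Int) := by
            push_cast [hkn]; omega
          have hlt' : i - k.toNat < arr.length := by omega
          have hget : PySem.List.pyGet? arr ((i : Int) - k)
              = some (arr.getD (i - k.toNat) 0) := by
            rw [hidx]
            simp [PySem.List.pyGet?_natCast, List.getElem?_eq_getElem hlt']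
          rw [hget]
          apply hstep
          intro v
          rw [PySem.Set.mem_discard, hmem1]
          have hold : arr.getD (i - k.toNat) 0 ∈ w :=
            (Hw _).2 ⟨i - k.toNat, by omega, by omega, rfl⟩
          constructor
          · rintro ⟨hv1 | hv2, hne⟩
            · rcases (Hw _).1 hv1 with ⟨t, ht1, ht2, ht3⟩
              refine ⟨t, ?_, by omega, ht3⟩
              by_cases hti : t + k.toNat = i
              · exfalso
                have : t = i - k.toNat := by omega
                subst this
                exact hne ht3.symm
              · omega
            · exact ⟨i, by omega, by omega, hv2.symm⟩
          · rintro ⟨t, ht1, ht2, ht3⟩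
            by_cases hti : t = i
            · subst hti
              refine ⟨Or.inr ht3.symm, ?_⟩
              rw [← ht3]
              intro heq
              exact hc (heq ▸ hold)
            · have ht2' : t < i := by omega
              refine ⟨Or.inl ((Hw _).2 ⟨t, by omega, ht2', ht3⟩), ?_⟩
              intro heq
              by_cases htk : t = i - k.toNat
              · omega
              · have hlo : i - k.toNat < t := by omega
                exact Hnd (i - k.toNat) t hlo ht2' (by omega) (heq ▸ ht3).symm
        · rw [if_neg hki]
          apply hstep
          intro v
          rw [hmem1]
          have hik : i < k.toNat := by omega
          constructor
          · rintro (hv1 | hv2)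
            · rcases (Hw _).1 hv1 with ⟨t, ht1, ht2, ht3⟩
              exact ⟨t, by omega, by omega, ht3⟩
            · exact ⟨i, by omega, by omega, hv2.symm⟩
          · rintro ⟨t, ht1, ht2, ht3⟩
            by_cases hti : t = i
            · subst hti; exact Or.inr ht3.symm
            · exact Or.inl ((Hw _).2 ⟨t, by omega, by omega, ht3⟩)
    · have : i = arr.length := by omega
      subst this
      rw [List.drop_length, PySem.List.enumerate_nil, pvBLoop]
      constructor
      · intro hh; exact absurd hh (by simp)
      · rintro ⟨t, j, _, h2, _, _, _⟩; omega

-- ===== VERDICT (by name: the statement is the Claim_ definition above) =====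
theorem checkDuplicatesWithinK_spec : Claim_equal_checkDuplicatesWithinK := by
  intro arr k _
  unfold Spec_checkDuplicatesWithinK checkDuplicatesWithinK checkDuplicatesWithinK_alt
  by_cases hk : k ≤ 0
  · rw [if_pos hk]
    rcases hA : pvAOuter arr k 0 with _ | _
    · rfl
    · exfalso
      rcases (pvAOuter_iff arr k arr.length 0 (by omega)).1 hA with ⟨t, j, _, h2, _, h4, _⟩
      have : (t : Int) < (j : Int) := by exact_mod_cast h2
      omega
  · rw [if_neg hk]
    have hk0 : 0 < k := by omega
    have hB := pvBLoop_iff arr k hk0 arr.length 0 PySem.Set.empty (by omega) (by omega)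
      (by intro v
          constructor
          · intro hv; exact absurd hv (List.not_mem_nil)
          · rintro ⟨t, _, ht, _⟩; omega)
      (by intro t1 t2 _ h2 _; omega)
    rw [List.drop_zero] at hB
    have hA := pvAOuter_iff arr k arr.length 0 (by omega)
    have hiff : pvAOuter arr k 0 = true ↔
        pvBLoop arr k PySem.Set.empty (PySem.List.enumerate arr ((0 : Nat) : Int)) = true := by
      rw [hA, hB]
      constructor
      · rintro ⟨t, j, _, h2, h3, h4, h5⟩; exact ⟨t, j, h2, h3, by omega, h4, h5⟩
      · rintro ⟨t, j, h1, h2, _, h4, h5⟩; exact ⟨t, j, by omega, h1, h2, h4, h5⟩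
    have : ((0 : Nat) : Int) = (0 : Int) := by norm_num
    rw [this] at hiff
    rcases hA' : pvAOuter arr k 0 with _ | _
    · rcases hB' : pvBLoop arr k PySem.Set.empty (PySem.List.enumerate arr 0) with _ | _
      · rfl
      · rw [hA', hB'] at hiff
        exact absurd (hiff.2 rfl) (by simp)
    · rw [hA'] at hiff
      exact (hiff.1 rfl).symm
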